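-- pv_equiv track=rewrite | github.com/MartinMcCurley/the_gaimesmaster | basic_math_env.py | actions_for_answer
-- ===== SOURCE A (Python) =====
-- def actions_for_answer(answer, current_value=0):
--     actions = []
--     # Convert the answer to actions
--     # This will need to be adjusted based on the exact controls of the game
--     while current_value != answer:
--         if current_value < answer:
--             actions.append(2)  # UP
--             current_value += 1
--         else:
--             actions.append(5)  # DOWN
--             current_value -= 1
--     actions.append(1)  # FIRE to confirm the answer
--     return actions
-- ===== SOURCE B (Python) =====
-- def actions_for_answer(answer, current_value=0):
--     diff = answer - current_value
--     code = 2 if diff > 0 else 5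
--     return [code] * abs(int(diff)) + [1]
-- ===== Notes on version B (the rewrite author's own statement) =====
-- stated objective: faster
-- what changed: Replaces the one-step-at-a-time while loop with a closed-form count: compute diff = answer - current_value once and build [code]*abs(diff) + [1] directly.
import Mathlib
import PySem

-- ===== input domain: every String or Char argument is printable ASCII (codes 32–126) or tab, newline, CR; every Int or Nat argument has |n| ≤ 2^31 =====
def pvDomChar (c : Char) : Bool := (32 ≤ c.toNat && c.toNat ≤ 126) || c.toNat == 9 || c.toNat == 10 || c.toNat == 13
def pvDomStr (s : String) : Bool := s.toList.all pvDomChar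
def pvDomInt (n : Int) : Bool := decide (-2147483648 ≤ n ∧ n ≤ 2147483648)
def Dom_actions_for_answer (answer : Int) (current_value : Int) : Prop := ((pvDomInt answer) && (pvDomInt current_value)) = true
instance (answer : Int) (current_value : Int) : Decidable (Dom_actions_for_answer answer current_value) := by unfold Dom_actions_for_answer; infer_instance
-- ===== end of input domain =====

-- B replaces A's one-step while loop by a closed-form count-then-construct; faster by constant factor.


-- ===== PORT A =====
-- literal transliteration of A's while loop; each iteration emits one action
-- and moves current_value one step; the trailing 1 is appended when the loop exits.
-- the loop is total because |answer - current_value| shrinks each step; we make that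
-- measure explicit as structural fuel (exactly enough for the loop to finish).
def actions_for_answer_loop (answer : Int) (fuel : Nat) (current_value : Int) : List Int :=
  match fuel with
  | 0 => [1]
  | Nat.succ f =>
    if current_value ≠ answer then
      if current_value < answer then 2 :: actions_for_answer_loop answer f (current_value + 1)
      else 5 :: actions_for_answer_loop answer f (current_value - 1)
    else [1]

def actions_for_answer (answer : Int) (current_value : Int) : List Int :=
  actions_for_answer_loop answer (answer - current_value).natAbs current_value

-- ===== PORT B =====
def actions_for_answer_alt (answer : Int) (current_value : Int) : List Int :=
  let diff := answer - current_value
  let code : Int := if diff > 0 then 2 else 5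
  List.replicate diff.natAbs code ++ [1]

-- ===== PRECONDITION & SPEC =====
def Spec_actions_for_answer (answer : Int) (current_value : Int) (out : List Int) : Prop := out = actions_for_answer_alt answer current_value
instance (answer : Int) (current_value : Int) (out : List Int) : Decidable (Spec_actions_for_answer answer current_value out) := by unfold Spec_actions_for_answer; infer_instance

-- ===== CLAIM (what is proved, stated in full; the proofs are below) =====
def Claim_equal_actions_for_answer : Prop := ∀ (answer : Int) (current_value : Int), Dom_actions_for_answer answer current_value → Spec_actions_for_answer answer current_value (actions_for_answer answer current_value)

-- ===== LEMMAS AND PROOFS =====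
theorem actions_eq (answer : Int) : ∀ (n : Nat) (cv : Int), (answer - cv).natAbs = n →
    actions_for_answer_loop answer n cv = actions_for_answer_alt answer cv := by
  intro n
  induction n with
  | zero =>
      intro cv h
      have : cv = answer := by omega
      subst this
      simp [actions_for_answer_loop, actions_for_answer_alt]
  | succ n ih =>
      intro cv h
      have hne : cv ≠ answer := by omega
      rw [actions_for_answer_loop]
      by_cases hlt : cv < answer
      · have h1 : (answer - (cv + 1)).natAbs = n := by omega
        rw [if_pos hne, if_pos hlt, ih _ h1]
        simp only [actions_for_answer_alt]
        have hd1 : answer - cv > 0 := by omega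
        have hd2 : answer - (cv + 1) > 0 ∨ answer - (cv + 1) = 0 := by omega
        have hn1 : (answer - cv).natAbs = n + 1 := h
        rcases hd2 with hd2 | hd2
        · simp only [if_pos hd1, if_pos hd2, h1, hn1, List.replicate_succ]
          simp
        · simp only [if_pos hd1, hd2, hn1]
          have h0 : n = 0 := by omega
          simp [h0, List.replicate_succ]
      · have hgt : answer < cv := by omega
        have h1 : (answer - (cv - 1)).natAbs = n := by omega
        rw [if_pos hne, if_neg hlt, ih _ h1]
        simp only [actions_for_answer_alt]
        have hd1 : ¬ (answer - cv > 0) := by omega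
        have hd2 : ¬ (answer - (cv - 1) > 0) := by omega
        have hn1 : (answer - cv).natAbs = n + 1 := h
        simp only [if_neg hd1, if_neg hd2, h1, hn1, List.replicate_succ]
        simp

-- ===== VERDICT (by name: the statement is the Claim_ definition above) =====
theorem actions_for_answer_spec : Claim_equal_actions_for_answer := by
  intro answer cv _
  unfold Spec_actions_for_answer actions_for_answer
  exact actions_eq answer _ cv rfl
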